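-- pv_equiv track=rewrite | github.com/maksim0007/AOIS | lab1/binary_lab_full_project/divide.py | divide_direct
-- ===== SOURCE A (Python) =====
-- def divide_direct(x, y, precision=5):
--     if y == 0:
--         raise ZeroDivisionError("division by zero")
--
--     sign = -1 if (x < 0) ^ (y < 0) else 1
--
--     x = abs(x)
--     y = abs(y)
--
--     integer = x // y
--     remainder = x % y
--
--     frac = []
--
--     for _ in range(precision):
--         remainder *= 10
--         digit = remainder // y
--         frac.append(digit)
--         remainder %= y
--
--     return sign * integer, frac
-- ===== SOURCE B (Python) =====
-- def divide_direct(x, y, precision=5):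
--     sign = -1 if (x < 0) ^ (y < 0) else 1
--     xa, ya = abs(x), abs(y)
--     integer, rem = divmod(xa, ya)
--     frac = []
--     left = max(precision, 0)
--     while left > 0:
--         t = min(9, left)
--         block, rem = divmod(rem * 10 ** t, ya)
--         chunk = []
--         for _ in range(t):
--             block, d = divmod(block, 10)
--             chunk.append(d)
--         frac.extend(reversed(chunk))
--         left -= t
--     return sign * integer, frac
-- ===== Notes on version B (the rewrite author's own statement) =====
-- stated objective: alternative
-- what changed: Instead of one division by y per fractional digit, B does one machine-word division per 9-digit chunk (remainder*10**t divmod y) and decodes each chunk's digits locally with divmod by 10, extending the result chunk by chunk.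
import Mathlib
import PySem

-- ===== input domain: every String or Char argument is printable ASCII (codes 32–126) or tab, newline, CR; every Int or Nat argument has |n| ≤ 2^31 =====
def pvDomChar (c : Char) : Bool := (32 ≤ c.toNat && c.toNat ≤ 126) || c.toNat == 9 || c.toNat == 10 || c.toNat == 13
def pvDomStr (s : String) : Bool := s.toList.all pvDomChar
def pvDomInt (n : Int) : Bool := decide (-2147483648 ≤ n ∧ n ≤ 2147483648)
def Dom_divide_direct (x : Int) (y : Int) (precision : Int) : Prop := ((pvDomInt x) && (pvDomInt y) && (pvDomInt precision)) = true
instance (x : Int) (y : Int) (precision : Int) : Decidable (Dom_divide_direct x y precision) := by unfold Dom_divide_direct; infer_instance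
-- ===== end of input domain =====

-- B replaces A's one-division-per-digit loop by a single big division followed by divmod-by-10 digit peeling (objective: alternative).

-- ===== PORT A =====
def divide_direct (x : Int) (y : Int) (precision : Int) : Int × List Int :=
  -- the 'if y == 0: raise ZeroDivisionError' is excluded by Pre_divide_direct
  let sign : Int := if (decide (x < 0)).xor (decide (y < 0)) then -1 else 1
  let xa := |x|
  let ya := |y|
  let integer := PySem.Int.floordiv xa ya
  let remainder := PySem.Int.mod xa ya
  let st := (PySem.List.pyRange 0 precision 1).foldl
      (fun (s : List Int × Int) _ =>
        let r := s.2 * 10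
        (s.1 ++ [PySem.Int.floordiv r ya], PySem.Int.mod r ya)) ([], remainder)
  (sign * integer, st.1)

-- ===== PORT B =====
-- inner for-loop of B: peel t digits off block with divmod(block, 10), least significant first
def pvChunks (ya : Int) (rem : Int) (left : Nat) : List Int :=
  if _h : left = 0 then []
  else
    let t := min 9 left
    let m := rem * 10 ^ t
    let st := (List.range t).foldl
      (fun (s : Int × List Int) _ =>
        (PySem.Int.floordiv s.1 10, s.2 ++ [PySem.Int.mod s.1 10]))
      (PySem.Int.floordiv m ya, [])
    st.2.reverse ++ pvChunks ya (PySem.Int.mod m ya) (left - t)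
  termination_by left
  decreasing_by omega

def divide_direct_alt (x : Int) (y : Int) (precision : Int) : Int × List Int :=
  let sign : Int := if (decide (x < 0)).xor (decide (y < 0)) then -1 else 1
  let xa := |x|
  let ya := |y|
  let integer := PySem.Int.floordiv xa ya
  let rem := PySem.Int.mod xa ya
  let left := (max precision 0).toNat
  (sign * integer, pvChunks ya rem left)

-- ===== PRECONDITION & SPEC =====
-- Pre_ excludes exactly y = 0, where Python A raises ZeroDivisionError (B raises there too).
def Pre_divide_direct (x : Int) (y : Int) (precision : Int) : Prop := y ≠ 0
instance (x : Int) (y : Int) (precision : Int) : Decidable (Pre_divide_direct x y precision) := by unfold Pre_divide_direct; infer_instance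
def pvWitness_divide_direct : Int × Int × Int := (7, 3, 5)

def Spec_divide_direct (x : Int) (y : Int) (precision : Int) (out : Int × List Int) : Prop := out = divide_direct_alt x y precision
instance (x : Int) (y : Int) (precision : Int) (out : Int × List Int) : Decidable (Spec_divide_direct x y precision out) := by unfold Spec_divide_direct; infer_instance

-- ===== CLAIM (what is proved, stated in full; the proofs are below) =====
def Claim_equal_divide_direct : Prop := ∀ (x : Int) (y : Int) (precision : Int), Dom_divide_direct x y precision → Pre_divide_direct x y precision → Spec_divide_direct x y precision (divide_direct x y precision)

-- ===== LEMMAS AND PROOFS =====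

-- A's fractional loop, as structural recursion on the number of digits (state: digits so far, remainder)
def loopA (y r : Int) : Nat → List Int × Int
  | 0 => ([], r)
  | n+1 => ((r * 10) / y :: (loopA y ((r * 10) % y) n).1, (loopA y ((r * 10) % y) n).2)

-- B's digit-peeling loop (state: remaining number, digits so far, least significant first)
def loopB (n : Int) : Nat → Int × List Int
  | 0 => (n, [])
  | k+1 => ((loopB (n / 10) k).1, n % 10 :: (loopB (n / 10) k).2)

theorem foldlA {y : Int} (hy : 0 < y) {α : Type} :
    ∀ (l : List α) (acc : List Int) (r : Int),
      l.foldl (fun (s : List Int × Int) _ =>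
        let r := s.2 * 10
        (s.1 ++ [PySem.Int.floordiv r y], PySem.Int.mod r y)) (acc, r)
      = (acc ++ (loopA y r l.length).1, (loopA y r l.length).2) := by
  intro l
  induction l with
  | nil => intro acc r; simp [loopA]
  | cons a t ih =>
    intro acc r
    simp only [List.foldl_cons]
    rw [ih]
    simp [loopA, PySem.Int.floordiv_eq_ediv_of_pos hy, PySem.Int.mod_eq_emod_of_pos hy,
      List.append_assoc]

theorem foldlB {α : Type} :
    ∀ (l : List α) (acc : List Int) (n : Int),
      l.foldl (fun (s : Int × List Int) _ =>
        (PySem.Int.floordiv s.1 10, s.2 ++ [PySem.Int.mod s.1 10])) (n, acc)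
      = ((loopB n l.length).1, acc ++ (loopB n l.length).2) := by
  intro l
  induction l with
  | nil => intro acc n; simp [loopB]
  | cons a t ih =>
    intro acc n
    simp only [List.foldl_cons]
    rw [ih]
    simp [loopB, List.append_assoc]

-- peeling p+1 digits of n < 10^(p+1) produces the top digit n / 10^p last
theorem loopB_snoc : ∀ (p : Nat) (n : Int), 0 ≤ n → n < 10 ^ (p+1) →
    (loopB n (p+1)).2 = (loopB (n % 10 ^ p) p).2 ++ [n / 10 ^ p] := by
  intro p
  induction p with
  | zero =>
    intro n h0 h1
    simp [loopB, Int.emod_eq_of_lt h0 (by simpa using h1)]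
  | succ p ih =>
    intro n h0 h1
    have h10 : ((10:Int) ∣ 10 ^ (p+1)) := dvd_pow_self 10 (Nat.succ_ne_zero p)
    have hd0 : (0:Int) ≤ n / 10 := Int.ediv_nonneg h0 (by norm_num)
    have hd1 : n / 10 < 10 ^ (p+1) := by
      rw [Int.ediv_lt_iff_lt_mul (by norm_num)]
      calc n < 10 ^ (p+1+1) := h1
        _ = 10 ^ (p+1) * 10 := by ring
    have key := ih (n / 10) hd0 hd1
    have e1 : (n % 10 ^ (p+1)) % 10 = n % 10 := Int.emod_emod_of_dvd n h10
    have e2 : (n / 10) / 10 ^ p = n / 10 ^ (p+1) := by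
      rw [Int.ediv_ediv_of_nonneg (by norm_num : (0:Int) ≤ 10)]
      norm_num [pow_succ, mul_comm]
    have e3 : (n % 10 ^ (p+1)) / 10 = (n / 10) % 10 ^ p := by
      rw [Int.emod_def n, Int.emod_def (n / 10), e2]
      rw [show n - 10 ^ (p+1) * (n / 10 ^ (p+1))
            = n + (-(10 ^ p * (n / 10 ^ (p+1)))) * 10 by ring]
      rw [Int.add_mul_ediv_right _ _ (by norm_num : (10:Int) ≠ 0)]
      ring
    have u1 : ∀ (m : Int) (k : Nat), (loopB m (k+1)).2 = m % 10 :: (loopB (m / 10) k).2 :=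
      fun _ _ => rfl
    rw [u1 n (p+1), u1 (n % 10 ^ (p+1)) p, key, e1, e3, e2, List.cons_append]

theorem frac_eq : ∀ (p : Nat) (y r : Int), 0 < y → 0 ≤ r → r < y →
    (loopA y r p).1 = ((loopB (r * 10 ^ p / y) p).2).reverse := by
  intro p
  induction p with
  | zero => intro y r hy h0 h1; simp [loopA, loopB]
  | succ p ih =>
    intro y r hy h0 h1
    have hs0 : 0 ≤ r * 10 % y := Int.emod_nonneg _ (by omega)
    have hs1 : r * 10 % y < y := Int.emod_lt_of_pos _ hy
    have hq0 : 0 ≤ r * 10 / y := Int.ediv_nonneg (by omega) (by omega)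
    have hq9 : r * 10 / y < 10 := by
      rw [Int.ediv_lt_iff_lt_mul hy]
      nlinarith
    have hP : (0:Int) < 10 ^ p := by positivity
    have hM0 : 0 ≤ (r * 10 % y) * 10 ^ p / y := Int.ediv_nonneg (by positivity) (by omega)
    have hM1 : (r * 10 % y) * 10 ^ p / y < 10 ^ p := by
      rw [Int.ediv_lt_iff_lt_mul hy]
      nlinarith
    have hrs : r * 10 = y * (r * 10 / y) + r * 10 % y := by
      have := Int.emod_add_mul_ediv (r * 10) y; omega
    have hN : r * 10 ^ (p+1) / y = (r * 10 % y) * 10 ^ p / y + (r * 10 / y) * 10 ^ p := by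
      have h : r * 10 ^ (p+1) = (r * 10 % y) * 10 ^ p + ((r * 10 / y) * 10 ^ p) * y := by
        rw [pow_succ]; nlinarith [hrs]
      rw [h, Int.add_mul_ediv_right _ _ (by omega : y ≠ 0)]
    have hNd : (r * 10 ^ (p+1) / y) / 10 ^ p = r * 10 / y := by
      rw [hN, Int.add_mul_ediv_right _ _ (by omega : (10:Int) ^ p ≠ 0),
        Int.ediv_eq_zero_of_lt hM0 hM1, zero_add]
    have hNm : (r * 10 ^ (p+1) / y) % 10 ^ p = (r * 10 % y) * 10 ^ p / y := by
      rw [hN, Int.add_mul_emod_self_right]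
      exact Int.emod_eq_of_lt hM0 hM1
    have hN0 : 0 ≤ r * 10 ^ (p+1) / y := Int.ediv_nonneg (by positivity) (by omega)
    have hN1 : r * 10 ^ (p+1) / y < 10 ^ (p+1) := by
      rw [hN, pow_succ]
      nlinarith
    rw [show (loopA y r (p+1)).1
          = r * 10 / y :: (loopA y (r * 10 % y) p).1 from rfl]
    rw [loopB_snoc p _ hN0 hN1, hNm, hNd, List.reverse_append,
      ih y (r * 10 % y) hy hs0 hs1]
    simp

-- multiplying a residue before reducing again does not change the residue
theorem emod_mul_pow (a y c : Int) : ((a % y) * c) % y = (a * c) % y := by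
  conv_lhs => rw [Int.mul_emod, Int.emod_emod_of_dvd _ dvd_rfl, ← Int.mul_emod]

theorem loopA_add {y : Int} (hy : 0 < y) :
    ∀ (a b : Nat) (r : Int), 0 ≤ r → r < y →
      (loopA y r (a + b)).1
        = (loopA y r a).1 ++ (loopA y ((r * 10 ^ a) % y) b).1 := by
  intro a
  induction a with
  | zero =>
    intro b r h0 h1
    simp [loopA, Int.emod_eq_of_lt h0 h1]
  | succ a ih =>
    intro b r h0 h1
    have hs0 : 0 ≤ r * 10 % y := Int.emod_nonneg _ (by omega)
    have hs1 : r * 10 % y < y := Int.emod_lt_of_pos _ hy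
    have e : ((r * 10 % y) * 10 ^ a) % y = (r * 10 ^ (a+1)) % y := by
      rw [emod_mul_pow]
      congr 1
      ring
    have u : ∀ (s : Int) (k : Nat),
        (loopA y s (k+1)).1 = s * 10 / y :: (loopA y (s * 10 % y) k).1 := fun _ _ => rfl
    rw [show a + 1 + b = (a + b) + 1 by omega, u r (a + b), ih b (r * 10 % y) hs0 hs1, e,
      u r a, List.cons_append]

theorem chunks_eq {y : Int} (hy : 0 < y) :
    ∀ (left : Nat) (r : Int), 0 ≤ r → r < y →
      pvChunks y r left = (loopA y r left).1 := by
  intro left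
  induction left using Nat.strong_induction_on with
  | _ left ih =>
    intro r h0 h1
    rw [pvChunks]
    by_cases h : left = 0
    · simp [h, loopA]
    · rw [dif_neg h]
      dsimp only
      have ht1 : 1 ≤ min 9 left := by omega
      have ht2 : min 9 left ≤ left := by omega
      have hs0 : 0 ≤ (r * 10 ^ min 9 left) % y := Int.emod_nonneg _ (by omega)
      have hs1 : (r * 10 ^ min 9 left) % y < y := Int.emod_lt_of_pos _ hy
      rw [foldlB (List.range (min 9 left)) [] _]
      simp only [List.length_range, List.nil_append]
      rw [PySem.Int.floordiv_eq_ediv_of_pos hy, PySem.Int.mod_eq_emod_of_pos hy]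
      rw [← frac_eq (min 9 left) y r hy h0 h1]
      rw [ih (left - min 9 left) (by omega) _ hs0 hs1]
      rw [← loopA_add hy (min 9 left) (left - min 9 left) r h0 h1]
      rw [show min 9 left + (left - min 9 left) = left by omega]

-- ===== VERDICT (by name: the statement is the Claim_ definition above) =====
theorem divide_direct_spec : Claim_equal_divide_direct := by
  intro x y precision _ hpre
  unfold Spec_divide_direct divide_direct divide_direct_alt
  have hy : (0:Int) < |y| := abs_pos.mpr hpre
  have hr0 : 0 ≤ PySem.Int.mod |x| |y| := PySem.Int.mod_nonneg _ hy
  have hr1 : PySem.Int.mod |x| |y| < |y| := PySem.Int.mod_lt _ hy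
  have hlenA : (PySem.List.pyRange 0 precision 1).length = precision.toNat := by
    simp [PySem.List.length_pyRange_one]
  have htn : (max precision 0).toNat = precision.toNat := by omega
  simp only [foldlA hy, hlenA, htn, List.nil_append]
  rw [chunks_eq hy precision.toNat _ hr0 hr1]
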